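-- pv_equiv track=rewrite | github.com/PatrickHechler/Advent-of-Code-2024-exchange | exchange/day07/matthias/day07.py | calc_val_2
-- ===== SOURCE A (Python) =====
-- from typing import Callable, Generator, Sequence
--
-- def calc_val_2(num_seq: Sequence[int]) -> Generator[int, None, None]:
--     """Werteliste für Teilaufgabe 2 erzeugen
--
--     Args:
--         num_seq: Folge der Zahlen, zwischen denen die Operatoren einzusetzen sind
--
--     Yields:
--         Die sich durch Einfügen von +, * und || ergebenden Werte
--     """
--     val_last = num_seq[-1]
--
--     if len(num_seq) == 1:
--         yield val_last
--     else:
--         for val_left in calc_val_2(num_seq[:-1]):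
--             yield val_left + val_last  # operator +
--             yield val_left * val_last  # operator *
--             yield int(str(val_left) + str(val_last))  # operator ||
-- ===== SOURCE B (Python) =====
-- def calc_val_2(num_seq):
--     """Iterative breadth-wise reformulation: build the list of all values
--     level by level, then yield them in order."""
--     vals = [num_seq[0]]
--     for n in num_seq[1:]:
--         new_vals = []
--         for v in vals:
--             new_vals.append(v + n)
--             new_vals.append(v * n)
--             new_vals.append(int(str(v) + str(n)))
--         vals = new_vals
--     yield from vals
-- ===== Notes on version B (the rewrite author's own statement) =====
-- stated objective: alternative
-- what changed: Replaces the back-to-front recursion with generator re-entry by a single forward iterative loop that extends a list of partial results level by level and yields it once at the end.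
import Mathlib
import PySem

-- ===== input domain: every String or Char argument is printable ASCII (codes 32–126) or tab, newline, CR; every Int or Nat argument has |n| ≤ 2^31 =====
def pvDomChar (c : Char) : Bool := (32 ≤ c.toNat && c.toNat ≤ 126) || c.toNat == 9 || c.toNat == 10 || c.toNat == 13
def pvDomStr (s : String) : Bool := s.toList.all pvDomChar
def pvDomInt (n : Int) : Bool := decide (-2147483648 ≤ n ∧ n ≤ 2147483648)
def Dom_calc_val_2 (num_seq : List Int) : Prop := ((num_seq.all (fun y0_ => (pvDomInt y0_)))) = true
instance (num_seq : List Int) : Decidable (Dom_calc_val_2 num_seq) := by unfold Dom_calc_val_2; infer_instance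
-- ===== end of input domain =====

-- B replaces A's back-to-front recursion (with generator re-entry) by one forward loop that
-- extends the list of partial values level by level; objective: alternative decomposition,
-- same exact output order. Equality of RETURN VALUES (the fully-consumed generator as a list).

-- int(str(a) ++ str(b)): exact whenever 0 ≤ b (Pre_ guarantees this for every concat operand;
-- for b < 0 Python raises ValueError, which Pre_ excludes).
def intConcat (a b : Int) : Int :=
  (PySem.Int.ofChars? (PySem.Int.toChars a ++ PySem.Int.toChars b)).getD 0

-- ===== PORT A =====
def calc_val_2 (num_seq : List Int) : List Int :=
  if h : num_seq = [] then []  -- Python raises IndexError on num_seq[-1]; excluded by Pre_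
  else
    let val_last := num_seq.getLast h          -- num_seq[-1]
    if num_seq.length = 1 then [val_last]
    else
      (calc_val_2 num_seq.dropLast).flatMap fun val_left =>
        [val_left + val_last, val_left * val_last, intConcat val_left val_last]
termination_by num_seq.length
decreasing_by
  simp only [List.length_dropLast]
  have hlen : num_seq.length ≠ 0 := by simpa [List.length_eq_zero_iff] using h
  omega

-- ===== PORT B =====
def calc_val_2_alt (num_seq : List Int) : List Int :=
  match num_seq with
  | [] => []  -- Python raises IndexError on num_seq[0]; excluded by Pre_
  | h :: t =>
    t.foldl (fun vals n =>
      vals.foldl (fun new_vals v =>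
        new_vals ++ [v + n, v * n, intConcat v n]) []) [h]

-- ===== PRECONDITION & SPEC =====
-- Pre_: A raises IndexError on the empty list and ValueError when any element after the first is negative
-- (str(val_last) then starts with '-', so int(str(val_left)+str(val_last)) fails).
def Pre_calc_val_2 (num_seq : List Int) : Prop :=
  num_seq ≠ [] ∧ ∀ n ∈ num_seq.tail, 0 ≤ n
instance (num_seq : List Int) : Decidable (Pre_calc_val_2 num_seq) := by
  unfold Pre_calc_val_2; infer_instance
def pvWitness_calc_val_2 : List Int := [2, 3, 4]

def Spec_calc_val_2 (num_seq : List Int) (out : List Int) : Prop := out = calc_val_2_alt num_seq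
instance (num_seq : List Int) (out : List Int) : Decidable (Spec_calc_val_2 num_seq out) := by
  unfold Spec_calc_val_2; infer_instance

-- ===== CLAIM (what is proved, stated in full; the proofs are below) =====
def Claim_equal_calc_val_2 : Prop := ∀ (num_seq : List Int), Dom_calc_val_2 num_seq → Pre_calc_val_2 num_seq → Spec_calc_val_2 num_seq (calc_val_2 num_seq)

-- ===== LEMMAS AND PROOFS =====

-- B's inner append-loop builds exactly the flatMap of the three-way expansion.
theorem inner_loop_eq_flatMap (n : Int) (vals : List Int) :
    vals.foldl (fun new_vals v => new_vals ++ [v + n, v * n, intConcat v n]) [] =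
      vals.flatMap (fun v => [v + n, v * n, intConcat v n]) := by
  simpa using PySem.List.foldl_append_eq_flatMap (fun v => [v + n, v * n, intConcat v n]) vals []

theorem calc_val_2_cons_eq (h : Int) (t : List Int) :
    calc_val_2 (h :: t) =
      t.foldl (fun vals n =>
        vals.foldl (fun new_vals v =>
          new_vals ++ [v + n, v * n, intConcat v n]) []) [h] := by
  induction t using List.reverseRecOn with
  | nil => unfold calc_val_2; simp
  | append_singleton t' x ih =>
    unfold calc_val_2
    rw [dif_neg (by simp : ¬ (h :: (t' ++ [x])) = [])]
    have hlast : (h :: (t' ++ [x])).getLast (by simp) = x :=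
      List.getLast_concat (l := h :: t')
    have hdrop : (h :: (t' ++ [x])).dropLast = h :: t' :=
      List.dropLast_concat (l₁ := h :: t')
    have hlen : ¬ (h :: (t' ++ [x])).length = 1 := by simp
    simp only [hlast, hdrop, if_neg hlen, ih]
    rw [List.foldl_append]
    simp only [List.foldl_cons, List.foldl_nil]
    rw [inner_loop_eq_flatMap]

-- ===== VERDICT (by name: the statement is the Claim_ definition above) =====
theorem calc_val_2_spec : Claim_equal_calc_val_2 := by
  intro num_seq _hdom hpre
  unfold Spec_calc_val_2
  obtain ⟨hne, -⟩ := hpre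
  match num_seq, hne with
  | h :: t, _ =>
    rw [calc_val_2_cons_eq]
    rfl
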